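-- pv_equiv track=rewrite | github.com/leeked/11-Puzzle | puzzle.py | expand_actions
-- ===== SOURCE A (Python) =====
-- def expand_actions(state):
-- 	poss_actions = []
--
-- 	# Find index of blank
-- 	ind = 0
--
-- 	for i in range(len(state)):
-- 		if state[i] == 0:
-- 			ind = i
--
-- 	# Determine possible actions
-- 	if ind % 4 != 0:
-- 		poss_actions.append('L')
--
-- 	if ind % 4 != 3:
-- 		poss_actions.append('R')
--
-- 	if ind > 3:
-- 		poss_actions.append('U')
--
-- 	if ind < 8:
-- 		poss_actions.append('D')
--
-- 	return poss_actions
-- ===== SOURCE B (Python) =====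
-- COL = [['R'], ['L', 'R'], ['L', 'R'], ['L']]
-- ROW = [['D'], ['U', 'D'], ['U']]
--
--
-- def expand_actions(state):
--     # blank = LAST index holding 0, default 0 (same rule as the original scan)
--     ind = next((i for i in range(len(state) - 1, -1, -1) if state[i] == 0), 0)
--     # table lookup instead of four boundary conditionals (fresh list via +)
--     return COL[ind % 4] + ROW[min(ind // 4, 2)]
-- ===== Notes on version B (the rewrite author's own statement) =====
-- stated objective: simpler
-- what changed: Replaces the four boundary conditionals by a lookup in two fixed tables (column part by ind%4, row part by min(ind//4,2)) and finds the last blank by a reverse-scan next(...) instead of a full forward fold.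
import Mathlib
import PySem

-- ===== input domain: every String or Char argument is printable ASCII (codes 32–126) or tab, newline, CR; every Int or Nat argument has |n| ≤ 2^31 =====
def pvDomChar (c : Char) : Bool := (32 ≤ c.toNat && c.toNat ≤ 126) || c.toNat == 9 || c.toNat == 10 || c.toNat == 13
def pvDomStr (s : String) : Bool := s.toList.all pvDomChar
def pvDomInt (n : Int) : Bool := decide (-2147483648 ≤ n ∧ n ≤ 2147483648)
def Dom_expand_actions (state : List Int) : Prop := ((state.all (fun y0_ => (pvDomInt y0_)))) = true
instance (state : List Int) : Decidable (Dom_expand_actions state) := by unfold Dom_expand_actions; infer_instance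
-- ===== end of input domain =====

-- B replaces A's four boundary conditionals by fixed-table lookups and finds the last blank
-- by a reverse-scan first match instead of a forward fold; objective: simpler.

-- ===== PORT A =====
def expand_actions (state : List Int) : List String :=
  -- for i in range(len(state)): if state[i] == 0: ind = i   (i is always in range, so the getD default 1 is never used)
  let ind : Int := (PySem.List.pyRange 0 (state.length : Int) 1).foldl
    (fun ind i => if PySem.List.pyGetD state i 1 = 0 then i else ind) 0
  let p0 : List String := []
  let p1 := if PySem.Int.mod ind 4 ≠ 0 then p0 ++ ["L"] else p0
  let p2 := if PySem.Int.mod ind 4 ≠ 3 then p1 ++ ["R"] else p1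
  let p3 := if ind > 3 then p2 ++ ["U"] else p2
  let p4 := if ind < 8 then p3 ++ ["D"] else p3
  p4

-- ===== PORT B =====
def pvCOL : List (List String) := [["R"], ["L", "R"], ["L", "R"], ["L"]]
def pvROW : List (List String) := [["D"], ["U", "D"], ["U"]]

def expand_actions_alt (state : List Int) : List String :=
  -- ind = next((i for i in range(len(state)-1, -1, -1) if state[i] == 0), 0)
  let ind : Int := ((PySem.List.pyRange ((state.length : Int) - 1) (-1) (-1)).find?
      (fun i => PySem.List.pyGetD state i 1 == 0)).getD 0
  -- COL[ind % 4] + ROW[min(ind // 4, 2)]   (both indices are always in range, so the getD default [] is never used)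
  pvCOL.getD (PySem.Int.mod ind 4).toNat [] ++ pvROW.getD (min (PySem.Int.floordiv ind 4) 2).toNat []

-- ===== PRECONDITION & SPEC =====
def Spec_expand_actions (state : List Int) (out : List String) : Prop := out = expand_actions_alt state
instance (state : List Int) (out : List String) : Decidable (Spec_expand_actions state out) := by unfold Spec_expand_actions; infer_instance

-- ===== CLAIM (what is proved, stated in full; the proofs are below) =====
def Claim_equal_expand_actions : Prop := ∀ (state : List Int), Dom_expand_actions state → Spec_expand_actions state (expand_actions state)

-- ===== LEMMAS AND PROOFS =====

-- A's ascending last-match fold equals B's descending first-match search.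
theorem lastIdx_eq (p : Int → Bool) (n : Nat) :
    (PySem.List.pyRange 0 (n : Int) 1).foldl (fun a i => if p i then i else a) 0
      = ((PySem.List.pyRange ((n : Int) - 1) (-1) (-1)).find? p).getD 0 := by
  induction n with
  | zero => simp [PySem.List.pyRange_one_eq_nil, PySem.List.pyRange_neg_one_eq_nil]
  | succ n ih =>
    have hasc : PySem.List.pyRange 0 ((n + 1 : Nat) : Int) 1
        = PySem.List.pyRange 0 (n : Int) 1 ++ [(n : Int)] := by
      push_cast
      exact PySem.List.pyRange_one_succ_right (by positivity)
    have hdesc : PySem.List.pyRange (((n + 1 : Nat) : Int) - 1) (-1) (-1)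
        = (n : Int) :: PySem.List.pyRange ((n : Int) - 1) (-1) (-1) := by
      push_cast
      rw [add_sub_cancel_right]
      exact PySem.List.pyRange_neg_one_cons (by omega)
    rw [hasc, hdesc, List.foldl_append, List.find?_cons]
    by_cases hp : p (n : Int) <;> simp [hp, ih]

-- For a nonnegative blank index, A's conditional appends equal B's table lookup.
theorem moves_eq (n : Nat) :
    (let p0 : List String := []
     let p1 := if PySem.Int.mod (n : Int) 4 ≠ 0 then p0 ++ ["L"] else p0
     let p2 := if PySem.Int.mod (n : Int) 4 ≠ 3 then p1 ++ ["R"] else p1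
     let p3 := if (n : Int) > 3 then p2 ++ ["U"] else p2
     if (n : Int) < 8 then p3 ++ ["D"] else p3)
      = pvCOL.getD (PySem.Int.mod (n : Int) 4).toNat []
        ++ pvROW.getD (min (PySem.Int.floordiv (n : Int) 4) 2).toNat [] := by
  have h1 : PySem.Int.mod (n : Int) 4 = ((n % 4 : Nat) : Int) := by
    exact_mod_cast PySem.Int.mod_natCast n 4
  have h2 : PySem.Int.floordiv (n : Int) 4 = ((n / 4 : Nat) : Int) := by
    exact_mod_cast PySem.Int.floordiv_natCast n 4
  have hc : n % 4 = 0 ∨ n % 4 = 1 ∨ n % 4 = 2 ∨ n % 4 = 3 := by omega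
  have hr : min ((n / 4 : Nat) : Int) 2 = 0 ∨ min ((n / 4 : Nat) : Int) 2 = 1
      ∨ min ((n / 4 : Nat) : Int) 2 = 2 := by omega
  rcases hc with hc | hc | hc | hc <;> rcases hr with hr | hr | hr <;>
    simp only [h1, h2, hc, hr] <;> simp [pvCOL, pvROW] <;> split_ifs <;>
    first | rfl | omega

-- ===== VERDICT (by name: the statement is the Claim_ definition above) =====
theorem expand_actions_spec : Claim_equal_expand_actions := by
  intro state _
  show expand_actions state = expand_actions_alt state
  unfold expand_actions expand_actions_alt
  have hfun : (fun (a i : Int) => if PySem.List.pyGetD state i 1 = 0 then i else a)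
      = (fun (a i : Int) => if (PySem.List.pyGetD state i 1 == 0) = true then i else a) := by
    funext a i
    split_ifs with h h' <;> simp_all
  rw [hfun, lastIdx_eq (fun i => PySem.List.pyGetD state i 1 == 0) state.length]
  obtain ⟨m, hm⟩ : ∃ m : Nat,
      ((PySem.List.pyRange ((state.length : Int) - 1) (-1) (-1)).find?
        (fun i => PySem.List.pyGetD state i 1 == 0)).getD 0 = (m : Nat) := by
    cases h : (PySem.List.pyRange ((state.length : Int) - 1) (-1) (-1)).find?
        (fun i => PySem.List.pyGetD state i 1 == 0) with
    | none => exact ⟨0, by simp [h]⟩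
    | some i =>
      have hmem := List.mem_of_find?_eq_some h
      have := (PySem.List.mem_pyRange_neg_one).1 hmem
      exact ⟨i.toNat, by simp; omega⟩
  rw [hm]
  exact moves_eq m
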